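-- pv_equiv track=rewrite | github.com/broyhill/BroyhillGOP | scripts/committee_ingestion_v4_phase_b_merged_dryrun.py | any_pair_share
-- ===== SOURCE A (Python) =====
-- from typing import Any, Dict, List, Optional, Set, Tuple
--
-- def any_pair_share(sets: List[Set[str]]) -> Tuple[bool, List[str]]:
--     s2 = [x for x in sets if x]
--     for i, a in enumerate(s2):
--         for b in s2[i + 1 :]:
--             t = a & b
--             if t:
--                 return True, sorted(t)[:20]
--     return False, []
-- ===== SOURCE B (Python) =====
-- from typing import List, Set, Tuple
--
-- def any_pair_share(sets: List[Set[str]]) -> Tuple[bool, List[str]]: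
--     s2 = [x for x in sets if x]
--     seen = {}          # element -> index of first set containing it
--     best = None        # lexicographically least sharing pair (i, j) seen so far
--     for j, s in enumerate(s2):
--         for e in s:
--             i = seen.get(e)
--             if i is None:
--                 seen[e] = j
--             else:
--                 cand = (i, j)
--                 if best is None or cand < best:
--                     best = cand
--     if best is None:
--         return False, []
--     i, j = best
--     return True, sorted(s2[i] & s2[j])[:20]
-- ===== Notes on version B (the rewrite author's own statement) =====
-- stated objective: alternative
-- what changed: A scans all pairs of sets with a nested loop, intersecting each pair until one intersects; B makes a single pass over all elements with a first-occurrence dictionary, tracking the lexicographically least sharing index pair, and intersects only that one pair at the end.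
import Mathlib
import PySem

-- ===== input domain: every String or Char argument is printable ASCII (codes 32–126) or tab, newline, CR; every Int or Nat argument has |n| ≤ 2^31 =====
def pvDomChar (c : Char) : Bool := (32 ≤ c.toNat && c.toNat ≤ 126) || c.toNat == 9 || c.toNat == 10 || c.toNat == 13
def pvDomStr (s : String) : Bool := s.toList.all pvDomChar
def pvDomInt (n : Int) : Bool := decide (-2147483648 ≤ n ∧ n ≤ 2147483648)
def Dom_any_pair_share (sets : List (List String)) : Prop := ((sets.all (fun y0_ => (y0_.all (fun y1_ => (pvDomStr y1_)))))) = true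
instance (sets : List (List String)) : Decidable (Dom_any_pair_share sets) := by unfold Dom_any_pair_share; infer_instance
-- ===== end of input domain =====

-- B replaces A's nested scan over all pairs by a single pass with a first-occurrence dictionary
-- that tracks the lexicographically least sharing index pair and intersects only that pair
-- (objective: alternative algorithm; not measured faster).

-- ===== PORT A =====
-- 'for b in s2[i+1:]: t = a & b; if t: return True, sorted(t)[:20]'
def apsInnerA (a : List String) : List (List String) → Option (List String)
  | [] => none
  | b :: bs =>
      let t := PySem.Set.inter a b
      if t.isEmpty then apsInnerA a bs
      else some ((PySem.List.sorted t (fun x => x) false).take 20)  -- sorted(t)[:20]; nonneg literal bound = take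

-- 'for i, a in enumerate(s2)' with early return
def apsGoA : List (List String) → Bool × List String
  | [] => (false, [])
  | a :: rest =>
      match apsInnerA a rest with
      | some r => (true, r)
      | none => apsGoA rest

def any_pair_share (sets : List (List String)) : Bool × List String :=
  let s2 := sets.filter (fun x => !x.isEmpty)
  apsGoA s2

-- ===== PORT B =====
-- body of the inner 'for e in s' loop: seen.get(e) / insert / tuple-< comparison of (i, j) with best
def apsStepB (j : Int) (st : PySem.Dict String Int × Option (Int × Int)) (e : String) :
    PySem.Dict String Int × Option (Int × Int) :=
  match st.1.get? e with
  | none => (st.1.insert e j, st.2)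
  | some i =>
      match st.2 with
      | none => (st.1, some (i, j))
      | some b => if i < b.1 ∨ (i = b.1 ∧ j < b.2) then (st.1, some (i, j)) else st

-- 'for j, s in enumerate(s2): for e in s: …' building (seen, best)
def apsFoldB (s2 : List (List String)) : PySem.Dict String Int × Option (Int × Int) :=
  (PySem.List.enumerate s2).foldl (fun st q => q.2.foldl (apsStepB q.1) st)
    (PySem.Dict.empty, none)

def any_pair_share_alt (sets : List (List String)) : Bool × List String :=
  let s2 := sets.filter (fun x => !x.isEmpty)
  match (apsFoldB s2).2 with
  | none => (false, [])
  | some (i, j) =>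
      let a := (PySem.List.pyGet? s2 i).getD []  -- s2[i]; the stored indices are always in range
      let b := (PySem.List.pyGet? s2 j).getD []  -- s2[j]
      (true, (PySem.List.sorted (PySem.Set.inter a b) (fun x => x) false).take 20)

-- ===== PRECONDITION & SPEC =====
-- Pre_ states the type-convention representation invariant only: each inner list holds the
-- DISTINCT elements of a Python set (a Set[str] can never contain duplicates).
def Pre_any_pair_share (sets : List (List String)) : Prop := ∀ s ∈ sets, s.Nodup
instance (sets : List (List String)) : Decidable (Pre_any_pair_share sets) := by
  unfold Pre_any_pair_share; infer_instance

def pvWitness_any_pair_share : List (List String) := [["a", "b"], ["c"], ["b", "c"]]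

def Spec_any_pair_share (sets : List (List String)) (out : Bool × List String) : Prop := out = any_pair_share_alt sets
instance (sets : List (List String)) (out : Bool × List String) : Decidable (Spec_any_pair_share sets out) := by unfold Spec_any_pair_share; infer_instance

-- ===== CLAIM (what is proved, stated in full; the proofs are below) =====
def Claim_equal_any_pair_share : Prop := ∀ (sets : List (List String)), Dom_any_pair_share sets → Pre_any_pair_share sets → Spec_any_pair_share sets (any_pair_share sets)

-- ===== LEMMAS AND PROOFS =====

-- two index sets share an element
def ElemShare (a b : List String) : Prop := ∃ e ∈ a, e ∈ b

-- (i, j) is a sharing pair of p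
def SharePair (p : List (List String)) (x : Nat × Nat) : Prop :=
  x.1 < x.2 ∧ x.2 < p.length ∧ ElemShare (p.getD x.1 []) (p.getD x.2 [])

def lexLe (m x : Nat × Nat) : Prop := m.1 < x.1 ∨ (m.1 = x.1 ∧ m.2 ≤ x.2)

-- 'o is the lexicographic minimum of the pairs satisfying P (none if there are none)'
def MinState (P : Nat × Nat → Prop) (o : Option (Int × Int)) : Prop :=
  (o = none ∧ ∀ x, ¬ P x) ∨
  ∃ m, P m ∧ (∀ x, P x → lexLe m x) ∧ o = some ((m.1 : Int), (m.2 : Int))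

-- index of the first set of p containing e
def firstIdx (e : String) : List (List String) → Option Nat
  | [] => none
  | s :: rest => if e ∈ s then some 0 else (firstIdx e rest).map (· + 1)

def SeenInv (p : List (List String)) (d : PySem.Dict String Int) : Prop :=
  ∀ e, d.get? e = (firstIdx e p).map (fun n => (n : Int))

-- the dictionary in the middle of processing set #n, with the elements 'done' already handled
def SeenMid (p : List (List String)) (n : Nat) (done : List String) (d : PySem.Dict String Int) : Prop :=
  ∀ e, d.get? e = match firstIdx e p with
    | some i => some (i : Int)
    | none => if e ∈ done then some (n : Int) else none

-- the candidate pairs present after handling 'done' elements of set #n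
def PairIn (p : List (List String)) (n : Nat) (done : List String) (x : Nat × Nat) : Prop :=
  SharePair p x ∨ (x.2 = n ∧ ∃ e ∈ done, firstIdx e p = some x.1)

-- the value A returns for the pair m
def renderP (p : List (List String)) (m : Nat × Nat) : Bool × List String :=
  (true, (PySem.List.sorted (PySem.Set.inter (p.getD m.1 []) (p.getD m.2 [])) (fun x => x) false).take 20)

theorem inter_isEmpty (a b : List String) :
    (PySem.Set.inter a b).isEmpty = true ↔ ¬ ElemShare a b := by
  rw [List.isEmpty_iff, List.eq_nil_iff_forall_not_mem]
  unfold ElemShare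
  constructor
  · rintro h ⟨e, he, heb⟩
    exact h e ((PySem.Set.mem_inter a b e).mpr ⟨he, heb⟩)
  · intro h e he
    rcases (PySem.Set.mem_inter a b e).mp he with ⟨h1, h2⟩
    exact h ⟨e, h1, h2⟩

theorem firstIdx_eq_none {e : String} {p : List (List String)} :
    firstIdx e p = none ↔ ∀ s ∈ p, e ∉ s := by
  induction p with
  | nil => simp [firstIdx]
  | cons s rest ih =>
    simp only [firstIdx]
    by_cases h : e ∈ s
    · simp [h]
    · simp [h, Option.map_eq_none_iff, ih]

theorem firstIdx_spec {e : String} {p : List (List String)} {i : Nat}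
    (h : firstIdx e p = some i) :
    i < p.length ∧ e ∈ p.getD i [] ∧ ∀ k, e ∈ p.getD k [] → i ≤ k := by
  induction p generalizing i with
  | nil => simp [firstIdx] at h
  | cons s rest ih =>
    simp only [firstIdx] at h
    by_cases hm : e ∈ s
    · rw [if_pos hm] at h
      injection h with h
      subst h
      exact ⟨by simp, by simpa using hm, fun k _ => Nat.zero_le k⟩
    · rw [if_neg hm] at h
      cases hrec : firstIdx e rest with
      | none => rw [hrec] at h; simp at h
      | some j =>
        rw [hrec] at h
        have hi : i = j + 1 := by simpa using h.symm
        subst hi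
        obtain ⟨h1, h2, h3⟩ := ih hrec
        refine ⟨by simp; omega, by simpa using h2, ?_⟩
        intro k hk
        cases k with
        | zero => rw [List.getD_cons_zero] at hk; exact absurd hk hm
        | succ k' =>
          have := h3 k' (by simpa using hk)
          omega

theorem firstIdx_append_singleton (e : String) (p : List (List String)) (s : List String) :
    firstIdx e (p ++ [s]) = match firstIdx e p with
      | some i => some i
      | none => if e ∈ s then some p.length else none := by
  induction p with
  | nil =>
    by_cases h : e ∈ s <;> simp [firstIdx, h]
  | cons t rest ih =>
    simp only [List.cons_append, firstIdx, ih]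
    by_cases h : e ∈ t
    · simp [h]
    · rw [if_neg h, if_neg h]
      cases hf : firstIdx e rest with
      | some i => simp
      | none =>
        by_cases hs : e ∈ s <;> simp [hs, List.length_cons]

-- ===== A-side characterisation =====

theorem innerA_eq_none {a : List String} {bs : List (List String)} :
    apsInnerA a bs = none ↔ ∀ b ∈ bs, ¬ ElemShare a b := by
  induction bs with
  | nil => simp [apsInnerA]
  | cons b bs ih =>
    simp only [apsInnerA]
    by_cases h : (PySem.Set.inter a b).isEmpty = true
    · have hna := (inter_isEmpty a b).mp h
      simp [h, ih, hna]
    · have hsh : ElemShare a b := by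
        by_contra hc
        exact h ((inter_isEmpty a b).mpr hc)
      rw [if_neg h]
      constructor
      · intro hc; simp at hc
      · intro hall
        exact absurd hsh (hall b List.mem_cons_self)

theorem innerA_eq_some {a : List String} (bs : List (List String)) (j : Nat)
    (hj : j < bs.length) (hs : ElemShare a (bs.getD j []))
    (hmin : ∀ k < j, ¬ ElemShare a (bs.getD k [])) :
    apsInnerA a bs =
      some ((PySem.List.sorted (PySem.Set.inter a (bs.getD j [])) (fun x => x) false).take 20) := by
  induction bs generalizing j with
  | nil => simp at hj
  | cons b bs ih =>
    cases j with
    | zero =>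
      simp only [List.getD_cons_zero] at hs ⊢
      have hne : ¬ (PySem.Set.inter a b).isEmpty = true := fun h => (inter_isEmpty a b).mp h hs
      simp [apsInnerA, hne]
    | succ j' =>
      have h0 : ¬ ElemShare a b := by
        have := hmin 0 (Nat.succ_pos _)
        simpa using this
      have hE : (PySem.Set.inter a b).isEmpty = true := (inter_isEmpty a b).mpr h0
      simp only [apsInnerA, hE, if_true, List.getD_cons_succ]
      exact ih j' (by simpa using hj) (by simpa using hs)
        (fun k hk => by simpa using hmin (k + 1) (by omega))

theorem sharePair_cons_shift {a : List String} {rest : List (List String)} {x : Nat × Nat}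
    (h : SharePair rest x) : SharePair (a :: rest) (x.1 + 1, x.2 + 1) := by
  obtain ⟨h1, h2, h3⟩ := h
  exact ⟨by omega, by simp; omega, by simpa using h3⟩

theorem goA_none {p : List (List String)} (h : ∀ x, ¬ SharePair p x) :
    apsGoA p = (false, []) := by
  induction p with
  | nil => rfl
  | cons a rest ih =>
    have hnone : apsInnerA a rest = none := by
      rw [innerA_eq_none]
      intro b hb hsh
      obtain ⟨k, hk, hbk⟩ := List.mem_iff_getElem.mp hb
      refine h (0, k + 1) ⟨by omega, by simp; omega, ?_⟩
      simp only [List.getD_cons_zero, List.getD_cons_succ]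
      rwa [List.getD_eq_getElem _ _ hk, hbk]
    simp only [apsGoA, hnone]
    exact ih (fun x hx => h (x.1 + 1, x.2 + 1) (sharePair_cons_shift hx))

theorem goA_min {p : List (List String)} {m : Nat × Nat}
    (hm : SharePair p m) (hmin : ∀ x, SharePair p x → lexLe m x) :
    apsGoA p = renderP p m := by
  induction p generalizing m with
  | nil =>
    obtain ⟨_, h2, _⟩ := hm
    simp at h2
  | cons a rest ih =>
    obtain ⟨i, j⟩ := m
    obtain ⟨hlt, hlen, hsh⟩ := hm
    simp only at hlt hlen hsh
    cases i with
    | zero =>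
      cases j with
      | zero => omega
      | succ j' =>
        have hj' : j' < rest.length := by simp at hlen; omega
        have hs' : ElemShare a (rest.getD j' []) := by
          simpa only [List.getD_cons_zero, List.getD_cons_succ] using hsh
        have hmin' : ∀ k < j', ¬ ElemShare a (rest.getD k []) := by
          intro k hk hshk
          have := hmin (0, k + 1) ⟨by omega, by simp; omega,
            by simpa only [List.getD_cons_zero, List.getD_cons_succ] using hshk⟩
          unfold lexLe at this
          simp only at this
          omega
        simp only [apsGoA, innerA_eq_some rest j' hj' hs' hmin']
        unfold renderP
        simp
    | succ i' =>
      cases j with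
      | zero => omega
      | succ j' =>
        have hnone : apsInnerA a rest = none := by
          rw [innerA_eq_none]
          intro b hb hsh'
          obtain ⟨k, hk, hbk⟩ := List.mem_iff_getElem.mp hb
          have := hmin (0, k + 1) ⟨by omega, by simp; omega, by
            simp only [List.getD_cons_zero, List.getD_cons_succ]
            rwa [List.getD_eq_getElem _ _ hk, hbk]⟩
          unfold lexLe at this
          simp only at this
          omega
        simp only [apsGoA, hnone]
        have hsh'' : SharePair rest (i', j') :=
          ⟨by omega, by simp at hlen; omega, by simpa only [List.getD_cons_succ] using hsh⟩
        have hmin'' : ∀ x, SharePair rest x → lexLe (i', j') x := by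
          intro x hx
          have := hmin (x.1 + 1, x.2 + 1) (sharePair_cons_shift hx)
          unfold lexLe at this ⊢
          simp only at this ⊢
          omega
        rw [ih hsh'' hmin'']
        unfold renderP
        simp

-- ===== B-side invariants =====

theorem minstate_congr {P Q : Nat × Nat → Prop} {o : Option (Int × Int)}
    (h : ∀ x, P x ↔ Q x) (hm : MinState P o) : MinState Q o := by
  unfold MinState at *
  rcases hm with ⟨ho, hno⟩ | ⟨m, hPm, hmin, ho⟩
  · exact Or.inl ⟨ho, fun x hx => hno x ((h x).mpr hx)⟩
  · exact Or.inr ⟨m, (h m).mp hPm, fun x hx => hmin x ((h x).mpr hx), ho⟩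

theorem minstate_transfer {P Q : Nat × Nat → Prop} {o : Option (Int × Int)}
    (h1 : ∀ x, P x → Q x) (h2 : ∀ x, Q x → ∃ y, P y ∧ lexLe y x)
    (hm : MinState P o) : MinState Q o := by
  unfold MinState at *
  rcases hm with ⟨ho, hno⟩ | ⟨m, hPm, hmin, ho⟩
  · refine Or.inl ⟨ho, fun x hx => ?_⟩
    obtain ⟨y, hPy, _⟩ := h2 x hx
    exact hno y hPy
  · refine Or.inr ⟨m, h1 m hPm, fun x hx => ?_, ho⟩
    obtain ⟨y, hPy, hyx⟩ := h2 x hx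
    have := hmin y hPy
    unfold lexLe at *
    omega

theorem minstate_insert {P : Nat × Nat → Prop} {o : Option (Int × Int)} (y : Nat × Nat)
    (hm : MinState P o) :
    MinState (fun x => P x ∨ x = y)
      (match o with
       | none => some ((y.1 : Int), (y.2 : Int))
       | some b => if (y.1 : Int) < b.1 ∨ ((y.1 : Int) = b.1 ∧ (y.2 : Int) < b.2)
                   then some ((y.1 : Int), (y.2 : Int)) else some b) := by
  unfold MinState at *
  rcases hm with ⟨ho, hno⟩ | ⟨m, hPm, hmin, ho⟩
  · subst ho
    refine Or.inr ⟨y, Or.inr rfl, fun x hx => ?_, rfl⟩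
    rcases hx with hP | rfl
    · exact absurd hP (hno x)
    · unfold lexLe; omega
  · subst ho
    dsimp only
    by_cases hc : (y.1 : Int) < (m.1 : Int) ∨ ((y.1 : Int) = (m.1 : Int) ∧ (y.2 : Int) < (m.2 : Int))
    · rw [if_pos hc]
      refine Or.inr ⟨y, Or.inr rfl, fun x hx => ?_, rfl⟩
      rcases hx with hP | rfl
      · have := hmin x hP
        unfold lexLe at this ⊢
        omega
      · unfold lexLe; omega
    · rw [if_neg hc]
      refine Or.inr ⟨m, Or.inl hPm, fun x hx => ?_, rfl⟩
      rcases hx with hP | rfl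
      · exact hmin x hP
      · unfold lexLe; omega

theorem innerB {p : List (List String)} {n : Nat} :
    ∀ (todo done : List String) (seen : PySem.Dict String Int) (best : Option (Int × Int)),
      (done ++ todo).Nodup →
      SeenMid p n done seen → MinState (PairIn p n done) best →
      SeenMid p n (done ++ todo) (todo.foldl (apsStepB (n : Int)) (seen, best)).1 ∧
      MinState (PairIn p n (done ++ todo)) (todo.foldl (apsStepB (n : Int)) (seen, best)).2 := by
  intro todo
  induction todo with
  | nil =>
    intro done seen best _ h1 h2
    simpa using ⟨h1, h2⟩
  | cons e todo ih =>
    intro done seen best hnd hS hM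
    have henot : e ∉ done :=
      fun hin => (List.nodup_append.mp hnd).2.2 e hin e (by simp) rfl
    have hnd' : ((done ++ [e]) ++ todo).Nodup := by simpa using hnd
    have hdone : (done ++ [e]) ++ todo = done ++ e :: todo := by simp
    rw [List.foldl_cons]
    cases hf : firstIdx e p with
    | none =>
      have hg : seen.get? e = none := by
        have := hS e
        rw [hf] at this
        simpa [henot] using this
      have hstep : apsStepB (n : Int) (seen, best) e = (seen.insert e (n : Int), best) := by
        unfold apsStepB
        rw [hg]
      rw [hstep]
      have hSmid : SeenMid p n (done ++ [e]) (seen.insert e (n : Int)) := by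
        intro e'
        by_cases he' : e' = e
        · subst he'
          rw [PySem.Dict.get?_insert_self, hf]
          simp
        · rw [PySem.Dict.get?_insert_of_ne seen _ he', hS e']
          cases firstIdx e' p with
          | some i => rfl
          | none => simp [he']
      have hMmid : MinState (PairIn p n (done ++ [e])) best := by
        refine minstate_congr (fun x => ?_) hM
        unfold PairIn
        constructor
        · rintro (h | ⟨h1, e', he', hfi⟩)
          · exact Or.inl h
          · exact Or.inr ⟨h1, e', by simp [he'], hfi⟩
        · rintro (h | ⟨h1, e', he', hfi⟩)
          · exact Or.inl h
          · rcases List.mem_append.mp he' with hd | hd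
            · exact Or.inr ⟨h1, e', hd, hfi⟩
            · have he'e : e' = e := by simpa using hd
              subst he'e
              rw [hf] at hfi
              exact absurd hfi (by simp)
      have hih := ih (done ++ [e]) _ _ hnd' hSmid hMmid
      rw [hdone] at hih
      exact hih
    | some i =>
      have hg : seen.get? e = some (i : Int) := by
        have := hS e
        rw [hf] at this
        exact this
      have hSmid : SeenMid p n (done ++ [e]) seen := by
        intro e'
        rw [hS e']
        cases hfe' : firstIdx e' p with
        | some k => rfl
        | none =>
          have he' : e' ≠ e := fun h => by rw [h, hf] at hfe'; cases hfe'
          simp [he']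
      have hPcongr : ∀ x, (PairIn p n done x ∨ x = (i, n)) ↔ PairIn p n (done ++ [e]) x := by
        intro x
        unfold PairIn
        constructor
        · rintro ((h | ⟨h1, e', he', hfi⟩) | rfl)
          · exact Or.inl h
          · exact Or.inr ⟨h1, e', by simp [he'], hfi⟩
          · exact Or.inr ⟨rfl, e, by simp, hf⟩
        · rintro (h | ⟨h1, e', he', hfi⟩)
          · exact Or.inl (Or.inl h)
          · rcases List.mem_append.mp he' with hd | hd
            · exact Or.inl (Or.inr ⟨h1, e', hd, hfi⟩)
            · have he'e : e' = e := by simpa using hd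
              subst he'e
              rw [hf] at hfi
              injection hfi with hx1
              refine Or.inr ?_
              rw [Prod.ext_iff]
              exact ⟨hx1.symm, h1⟩
      cases best with
      | none =>
        have hstep : apsStepB (n : Int) (seen, none) e = (seen, some ((i : Int), (n : Int))) := by
          unfold apsStepB
          rw [hg]
        rw [hstep]
        have hMmid : MinState (PairIn p n (done ++ [e])) (some ((i : Int), (n : Int))) := by
          refine minstate_congr hPcongr ?_
          exact minstate_insert (i, n) hM
        have hih := ih (done ++ [e]) _ _ hnd' hSmid hMmid
        rw [hdone] at hih
        exact hih
      | some b =>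
        have hstep : apsStepB (n : Int) (seen, some b) e =
            (seen, if (i : Int) < b.1 ∨ ((i : Int) = b.1 ∧ (n : Int) < b.2)
                   then some ((i : Int), (n : Int)) else some b) := by
          unfold apsStepB
          rw [hg]
          dsimp only
          by_cases hc : (i : Int) < b.1 ∨ ((i : Int) = b.1 ∧ (n : Int) < b.2) <;> simp [hc]
        rw [hstep]
        have hMmid : MinState (PairIn p n (done ++ [e]))
            (if (i : Int) < b.1 ∨ ((i : Int) = b.1 ∧ (n : Int) < b.2)
             then some ((i : Int), (n : Int)) else some b) := by
          refine minstate_congr hPcongr ?_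
          exact minstate_insert (i, n) hM
        have hih := ih (done ++ [e]) _ _ hnd' hSmid hMmid
        rw [hdone] at hih
        exact hih

theorem getD_append_left {p : List (List String)} {s : List String} {k : Nat}
    (h : k < p.length) : (p ++ [s]).getD k [] = p.getD k [] := by
  rw [List.getD_eq_getElem?_getD, List.getD_eq_getElem?_getD, List.getElem?_append_left h]

theorem getD_append_self {p : List (List String)} {s : List String} :
    (p ++ [s]).getD p.length [] = s := by
  rw [List.getD_eq_getElem?_getD]
  simp

theorem pairin_share {p : List (List String)} {s : List String} {x : Nat × Nat}
    (h : PairIn p p.length s x) : SharePair (p ++ [s]) x := by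
  rcases h with ⟨h1, h2, h3⟩ | ⟨h2, e, he, hfi⟩
  · exact ⟨h1, by simp; omega, by rwa [getD_append_left (by omega), getD_append_left h2]⟩
  · obtain ⟨hlt, hmem, _⟩ := firstIdx_spec hfi
    refine ⟨by omega, by simp; omega, ?_⟩
    rw [h2, getD_append_left hlt, getD_append_self]
    exact ⟨e, hmem, he⟩

theorem share_pairin {p : List (List String)} {s : List String} {x : Nat × Nat}
    (h : SharePair (p ++ [s]) x) : ∃ y, PairIn p p.length s y ∧ lexLe y x := by
  obtain ⟨h1, h2, h3⟩ := h
  have h2' : x.2 < p.length + 1 := by simpa using h2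
  rcases Nat.lt_or_ge x.2 p.length with hlt | hge
  · refine ⟨x, Or.inl ⟨h1, hlt, ?_⟩, Or.inr ⟨rfl, le_refl _⟩⟩
    rwa [getD_append_left (by omega), getD_append_left hlt] at h3
  · have hx2 : x.2 = p.length := by omega
    have hx1 : x.1 < p.length := by omega
    rw [hx2, getD_append_left hx1, getD_append_self] at h3
    obtain ⟨e, hea, hes⟩ := h3
    have hmemp : p.getD x.1 [] ∈ p := by
      rw [List.getD_eq_getElem _ _ hx1]
      exact List.getElem_mem _
    have hne : firstIdx e p ≠ none :=
      fun hnone => (firstIdx_eq_none.mp hnone) _ hmemp hea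
    obtain ⟨idx, hidx⟩ := Option.ne_none_iff_exists'.mp hne
    obtain ⟨_, _, hmin⟩ := firstIdx_spec hidx
    have hle : idx ≤ x.1 := hmin x.1 hea
    refine ⟨(idx, p.length), Or.inr ⟨rfl, e, hes, hidx⟩, ?_⟩
    unfold lexLe
    simp only
    omega

theorem outerB (p : List (List String)) (hnd : ∀ s ∈ p, s.Nodup) :
    SeenInv p (apsFoldB p).1 ∧ MinState (SharePair p) (apsFoldB p).2 := by
  induction p using List.reverseRecOn with
  | nil =>
    constructor
    · intro e
      simp [apsFoldB, firstIdx, PySem.Dict.get?_empty, PySem.List.enumerate_nil]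
    · exact Or.inl ⟨rfl, fun x hx => by obtain ⟨_, h2, _⟩ := hx; simp at h2⟩
  | append_singleton p s ih =>
    have hnd' : ∀ t ∈ p, t.Nodup := fun t ht => hnd t (by simp [ht])
    obtain ⟨hseen, hmin⟩ := ih hnd'
    rcases hst : apsFoldB p with ⟨seen, best⟩
    rw [hst] at hseen hmin
    have hfold : apsFoldB (p ++ [s]) = s.foldl (apsStepB (p.length : Int)) (seen, best) := by
      unfold apsFoldB
      rw [PySem.List.enumerate_append, List.foldl_append]
      have : apsFoldB p = (PySem.List.enumerate p 0).foldl
          (fun st q => q.2.foldl (apsStepB q.1) st) (PySem.Dict.empty, none) := rfl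
      rw [← this, hst]
      simp [PySem.List.enumerate_cons, PySem.List.enumerate_nil]
    have h0S : SeenMid p p.length [] seen := by
      intro e
      rw [hseen e]
      cases firstIdx e p <;> simp
    have h0M : MinState (PairIn p p.length []) best := by
      refine minstate_congr (fun x => ?_) hmin
      unfold PairIn
      simp
    have hmain := innerB s [] seen best (by simpa using hnd s (by simp)) h0S h0M
    rw [List.nil_append] at hmain
    rw [hfold]
    obtain ⟨hS1, hM1⟩ := hmain
    constructor
    · intro e
      rw [hS1 e, firstIdx_append_singleton]
      cases firstIdx e p with
      | some i => rfl
      | none => by_cases hs : e ∈ s <;> simp [hs]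
    · exact minstate_transfer (fun x hx => pairin_share hx) (fun x hx => share_pairin hx) hM1

-- ===== assembly =====

theorem main_eq (s2 : List (List String)) (hnd : ∀ s ∈ s2, s.Nodup) :
    apsGoA s2 = (match (apsFoldB s2).2 with
      | none => (false, [])
      | some (i, j) =>
          (true, (PySem.List.sorted
            (PySem.Set.inter ((PySem.List.pyGet? s2 i).getD []) ((PySem.List.pyGet? s2 j).getD []))
            (fun x => x) false).take 20)) := by
  obtain ⟨_, hmin⟩ := outerB s2 hnd
  rcases hmin with ⟨ho, hno⟩ | ⟨m, hPm, hminp, ho⟩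
  · rw [ho]
    exact goA_none hno
  · rw [ho, goA_min hPm hminp]
    unfold renderP
    simp only [PySem.List.pyGet?_natCast, List.getD_eq_getElem?_getD]

-- ===== VERDICT (by name: the statement is the Claim_ definition above) =====
theorem any_pair_share_spec : Claim_equal_any_pair_share := by
  intro sets _ pre
  unfold Spec_any_pair_share any_pair_share any_pair_share_alt
  exact main_eq _ (fun s hs => pre s (List.mem_of_mem_filter hs))
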